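-- pv_equiv track=rewrite | github.com/askoseeba/aoc2020 | day23/day23.py | select_destination
-- ===== SOURCE A (Python) =====
-- def select_destination(current, removed_cups, min_cup, max_cup):
--     destination = current - 1
--     while True:
--         if destination < min_cup_adjusted(removed_cups, min_cup):
--             return max_cup_adjusted(removed_cups, max_cup)
--         if destination in removed_cups:
--             destination -= 1
--             continue
--         return destination
--
-- def min_cup_adjusted(removed_cups, min_cup):
--     mc = min_cup
--     while mc in removed_cups:
--         mc += 1
--     return mc
--
-- def max_cup_adjusted(removed_cups, max_cup):
--     mc = max_cup
--     while mc in removed_cups: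
--         mc -= 1
--     return mc
-- ===== SOURCE B (Python) =====
-- def select_destination(current, removed_cups, min_cup, max_cup):
--     destination = current - 1
--     while destination in removed_cups or destination < min_cup:
--         if destination < min_cup:
--             destination = max_cup
--         else:
--             destination -= 1
--     return destination
-- ===== Notes on version B (the rewrite author's own statement) =====
-- stated objective: idiomatic
-- what changed: Replaces the two helper scans (min_cup_adjusted/max_cup_adjusted) plus the threshold test with the standard crab-cups idiom: one decrement-and-wrap loop that skips removed cups and wraps to max_cup when it drops below min_cup; Pre_ excludes inputs where the removed list covers every candidate cup, on which A returns a value below min_cup while B's wrap loop never terminates.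
-- outside the precondition, e.g. on select_destination(2, [1, 2, 3], 1, 3): A returns 0, B does not finish within the time limit
import Mathlib
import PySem

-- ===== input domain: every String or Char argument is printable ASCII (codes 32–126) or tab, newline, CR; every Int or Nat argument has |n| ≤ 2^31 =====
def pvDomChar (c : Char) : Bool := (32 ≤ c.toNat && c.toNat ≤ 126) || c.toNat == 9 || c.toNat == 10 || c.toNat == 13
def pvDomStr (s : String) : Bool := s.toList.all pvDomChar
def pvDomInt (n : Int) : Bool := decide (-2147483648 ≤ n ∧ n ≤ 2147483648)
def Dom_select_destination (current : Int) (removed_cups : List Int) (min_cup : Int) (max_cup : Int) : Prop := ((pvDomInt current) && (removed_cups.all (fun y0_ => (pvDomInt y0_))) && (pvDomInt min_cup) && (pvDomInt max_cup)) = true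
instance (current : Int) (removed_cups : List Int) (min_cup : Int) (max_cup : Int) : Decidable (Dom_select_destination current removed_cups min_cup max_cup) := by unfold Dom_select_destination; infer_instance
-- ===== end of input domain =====

-- B replaces A's two helper scans and threshold test with the standard single decrement-and-wrap
-- crab-cups loop (idiomatic); proved equal on Pre_, which excludes inputs where every candidate
-- cup is removed (there A returns a value below min_cup while B's wrap loop never terminates).


-- ===== PORT A =====
-- two facts needed only for the termination of the helpers' while-loops
theorem pvFilterLe_lt (l : List Int) (mc : Int) (h : mc ∈ l) :
    (l.filter (fun x => decide (x ≤ mc - 1))).length < (l.filter (fun x => decide (x ≤ mc))).length := by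
  induction l with
  | nil => cases h
  | cons a t ih =>
    have mono : (t.filter (fun x => decide (x ≤ mc - 1))).length ≤ (t.filter (fun x => decide (x ≤ mc))).length := by
      apply List.Sublist.length_le
      apply List.monotone_filter_right
      intro x hx; simp at hx ⊢; omega
    rcases List.mem_cons.mp h with heq | hmem
    · subst heq
      rw [List.filter_cons, List.filter_cons,
        if_neg (by simp only [decide_eq_true_eq]; omega),
        if_pos (by simp only [decide_eq_true_eq]; omega)]
      simp only [List.length_cons]; omega
    · have hlt := ih hmem
      rw [List.filter_cons, List.filter_cons]
      split_ifs with h1 h2 h2 <;> simp_all only [decide_eq_true_eq, List.length_cons] <;> omega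

theorem pvFilterGe_lt (l : List Int) (mc : Int) (h : mc ∈ l) :
    (l.filter (fun x => decide (mc + 1 ≤ x))).length < (l.filter (fun x => decide (mc ≤ x))).length := by
  induction l with
  | nil => cases h
  | cons a t ih =>
    have mono : (t.filter (fun x => decide (mc + 1 ≤ x))).length ≤ (t.filter (fun x => decide (mc ≤ x))).length := by
      apply List.Sublist.length_le
      apply List.monotone_filter_right
      intro x hx; simp at hx ⊢; omega
    rcases List.mem_cons.mp h with heq | hmem
    · subst heq
      rw [List.filter_cons, List.filter_cons,
        if_neg (by simp only [decide_eq_true_eq]; omega),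
        if_pos (by simp only [decide_eq_true_eq]; omega)]
      simp only [List.length_cons]; omega
    · have hlt := ih hmem
      rw [List.filter_cons, List.filter_cons]
      split_ifs with h1 h2 h2 <;> simp_all only [decide_eq_true_eq, List.length_cons] <;> omega

def min_cup_adjusted (removed_cups : List Int) (min_cup : Int) : Int :=
  if h : min_cup ∈ removed_cups then min_cup_adjusted removed_cups (min_cup + 1) else min_cup
termination_by (removed_cups.filter (fun x => decide (min_cup ≤ x))).length
decreasing_by exact pvFilterGe_lt _ _ h

-- needed (only) for the termination of A's main loop: the adjusted minimum is never a removed cup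
theorem pvMiNotMem (l : List Int) (m : Int) : min_cup_adjusted l m ∉ l := by
  fun_induction min_cup_adjusted l m with
  | case1 m hm ih => exact ih
  | case2 m hm => exact hm

def max_cup_adjusted (removed_cups : List Int) (max_cup : Int) : Int :=
  if h : max_cup ∈ removed_cups then max_cup_adjusted removed_cups (max_cup - 1) else max_cup
termination_by (removed_cups.filter (fun x => decide (x ≤ max_cup))).length
decreasing_by exact pvFilterLe_lt _ _ h

-- A's `while True` loop over `destination`
def selLoopA (removed_cups : List Int) (min_cup : Int) (max_cup : Int) (destination : Int) : Int :=
  if h1 : destination < min_cup_adjusted removed_cups min_cup then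
    max_cup_adjusted removed_cups max_cup
  else if h2 : destination ∈ removed_cups then
    selLoopA removed_cups min_cup max_cup (destination - 1)
  else destination
termination_by (destination - min_cup_adjusted removed_cups min_cup).toNat
decreasing_by
  have hnm := pvMiNotMem removed_cups min_cup
  have hne : destination ≠ min_cup_adjusted removed_cups min_cup := by rintro rfl; exact hnm h2
  simp_wf
  omega

def select_destination (current : Int) (removed_cups : List Int) (min_cup : Int) (max_cup : Int) : Int :=
  selLoopA removed_cups min_cup max_cup (current - 1)

-- ===== PORT B =====
-- B's while-loop; the fuel only makes the loop total, Pre_ guarantees it is never exhausted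
def selLoopB (removed_cups : List Int) (min_cup : Int) (max_cup : Int) : Nat → Int → Int
  | 0, destination => destination
  | fuel + 1, destination =>
    if destination ∈ removed_cups ∨ destination < min_cup then
      if destination < min_cup then selLoopB removed_cups min_cup max_cup fuel max_cup
      else selLoopB removed_cups min_cup max_cup fuel (destination - 1)
    else destination

def select_destination_alt (current : Int) (removed_cups : List Int) (min_cup : Int) (max_cup : Int) : Int :=
  selLoopB removed_cups min_cup max_cup
    ((current - 1 - min_cup).toNat + (max_cup - min_cup).toNat + 3) (current - 1)

-- ===== PRECONDITION & SPEC =====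
-- Pre_ excludes exactly the inputs where removed_cups contains every integer of
-- [min_cup, max (current-1) max_cup]: there A still returns (a cup below min_cup), but B's
-- wrap-around loop never terminates.
def Pre_select_destination (current : Int) (removed_cups : List Int) (min_cup : Int) (max_cup : Int) : Prop :=
  ((removed_cups.filter (fun x => decide (min_cup ≤ x ∧ x ≤ max (current - 1) max_cup))).dedup).length
    < (max (current - 1) max_cup - min_cup + 1).toNat
instance (current : Int) (removed_cups : List Int) (min_cup : Int) (max_cup : Int) : Decidable (Pre_select_destination current removed_cups min_cup max_cup) := by unfold Pre_select_destination; infer_instance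

def pvWitness_select_destination : Int × List Int × Int × Int := (4, [3], 1, 5)

def Spec_select_destination (current : Int) (removed_cups : List Int) (min_cup : Int) (max_cup : Int) (out : Int) : Prop := out = select_destination_alt current removed_cups min_cup max_cup
instance (current : Int) (removed_cups : List Int) (min_cup : Int) (max_cup : Int) (out : Int) : Decidable (Spec_select_destination current removed_cups min_cup max_cup out) := by unfold Spec_select_destination; infer_instance

-- ===== CLAIM (what is proved, stated in full; the proofs are below) =====
def Claim_equal_select_destination : Prop := ∀ (current : Int) (removed_cups : List Int) (min_cup : Int) (max_cup : Int), Dom_select_destination current removed_cups min_cup max_cup → Pre_select_destination current removed_cups min_cup max_cup → Spec_select_destination current removed_cups min_cup max_cup (select_destination current removed_cups min_cup max_cup)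

-- ===== LEMMAS AND PROOFS =====

theorem mi_ge (l : List Int) (m : Int) : m ≤ min_cup_adjusted l m := by
  fun_induction min_cup_adjusted l m with
  | case1 m hm ih => omega
  | case2 m hm => omega

theorem mi_le_of (l : List Int) (m x : Int) (hx : m ≤ x) (hnx : x ∉ l) :
    min_cup_adjusted l m ≤ x := by
  fun_induction min_cup_adjusted l m with
  | case1 m hm ih =>
    have : m ≠ x := by rintro rfl; exact hnx hm
    exact ih (by omega)
  | case2 m hm => omega

theorem ma_le (l : List Int) (m : Int) : max_cup_adjusted l m ≤ m := by
  fun_induction max_cup_adjusted l m with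
  | case1 m hm ih => omega
  | case2 m hm => omega

theorem ma_notmem (l : List Int) (m : Int) : max_cup_adjusted l m ∉ l := by
  fun_induction max_cup_adjusted l m with
  | case1 m hm ih => exact ih
  | case2 m hm => exact hm

theorem ma_ge (l : List Int) (m x : Int) (hx : x ≤ m) (hnx : x ∉ l) :
    x ≤ max_cup_adjusted l m := by
  fun_induction max_cup_adjusted l m with
  | case1 m hm ih =>
    have : m ≠ x := by rintro rfl; exact hnx hm
    exact ih (by omega)
  | case2 m hm => omega

theorem ma_eq_self (l : List Int) (m : Int) (h : m ∉ l) : max_cup_adjusted l m = m := by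
  rw [max_cup_adjusted]; simp [h]

theorem ma_step (l : List Int) (m : Int) (h : m ∈ l) :
    max_cup_adjusted l m = max_cup_adjusted l (m - 1) := by
  rw [max_cup_adjusted]; simp [h]

-- characterization of A's loop
theorem selLoopA_char (l : List Int) (mn mx d : Int) :
    selLoopA l mn mx d =
      if min_cup_adjusted l mn ≤ max_cup_adjusted l d then max_cup_adjusted l d
      else max_cup_adjusted l mx := by
  fun_induction selLoopA l mn mx d with
  | case1 d h =>
    have h1 := ma_le l d
    rw [if_neg (by omega)]
  | case2 d h hm ih =>
    rw [ih, ma_step l d hm]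
  | case3 d h hm =>
    rw [ma_eq_self l d hm, if_pos (by omega)]

-- B's loop descends to max_cup_adjusted when that stays ≥ min_cup
theorem selLoopB_descend (l : List Int) (mn mx : Int) (fuel : Nat) :
    ∀ d : Int, mn ≤ max_cup_adjusted l d → (d - max_cup_adjusted l d).toNat + 1 ≤ fuel →
      selLoopB l mn mx fuel d = max_cup_adjusted l d := by
  induction fuel with
  | zero => intro d _ hf; omega
  | succ f ih =>
    intro d hge hf
    by_cases hm : d ∈ l
    · have hne : max_cup_adjusted l d ≠ d := by rintro h; exact (h ▸ ma_notmem l d) hm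
      have hle := ma_le l d
      have hstep := ma_step l d hm
      rw [selLoopB, if_pos (Or.inl hm), if_neg (by omega), hstep]
      exact ih (d - 1) (hstep ▸ hge) (by omega)
    · have : max_cup_adjusted l d = d := ma_eq_self l d hm
      rw [selLoopB, if_neg (by rw [not_or]; constructor <;> [exact hm; omega]), this]

-- B's loop wraps once to max_cup when the descent from d finds nothing ≥ min_cup
theorem selLoopB_wrap (l : List Int) (mn mx : Int) (fuel : Nat) :
    ∀ d : Int, max_cup_adjusted l d < mn → mn ≤ max_cup_adjusted l mx →
      (d + 1 - mn).toNat + (mx - max_cup_adjusted l mx).toNat + 2 ≤ fuel →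
      selLoopB l mn mx fuel d = max_cup_adjusted l mx := by
  induction fuel with
  | zero => intro d _ _ hf; omega
  | succ f ih =>
    intro d hlt hge hf
    by_cases hlo : d < mn
    · rw [selLoopB, if_pos (Or.inr hlo), if_pos hlo]
      exact selLoopB_descend l mn mx f mx hge (by omega)
    · have hm : d ∈ l := by
        by_contra hnm
        have := ma_ge l d d le_rfl hnm
        have := ma_le l d
        omega
      rw [selLoopB, if_pos (Or.inl hm), if_neg hlo]
      refine ih (d - 1) ?_ hge ?_
      · rw [← ma_step l d hm]; exact hlt
      · omega

-- pigeonhole: Pre_ yields a free cup in [min_cup, max (current-1) max_cup]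
theorem pre_gap (current : Int) (l : List Int) (mn mx : Int)
    (h : Pre_select_destination current l mn mx) :
    ∃ x : Int, mn ≤ x ∧ x ≤ max (current - 1) mx ∧ x ∉ l := by
  by_contra hno
  push Not at hno
  unfold Pre_select_destination at h
  set M := max (current - 1) mx with hM
  have hsub : Finset.Icc mn M ⊆ (l.filter (fun x => decide (mn ≤ x ∧ x ≤ M))).toFinset := by
    intro x hx
    rw [Finset.mem_Icc] at hx
    rw [List.mem_toFinset, List.mem_filter]
    exact ⟨hno x hx.1 hx.2, by simp [hx.1, hx.2]⟩
  have hcard := Finset.card_le_card hsub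
  rw [Int.card_Icc, List.card_toFinset] at hcard
  omega

theorem pre_main (current : Int) (l : List Int) (mn mx : Int)
    (h : Pre_select_destination current l mn mx) :
    select_destination current l mn mx = select_destination_alt current l mn mx := by
  obtain ⟨x, hx1, hx2, hx3⟩ := pre_gap current l mn mx h
  unfold select_destination select_destination_alt
  rw [selLoopA_char]
  by_cases hcase : mn ≤ max_cup_adjusted l (current - 1)
  · -- descent from current-1 succeeds; A also takes that branch
    have hA : min_cup_adjusted l mn ≤ max_cup_adjusted l (current - 1) :=
      mi_le_of l mn _ hcase (ma_notmem l (current - 1))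
    rw [if_pos hA]
    exact (selLoopB_descend l mn mx _ (current - 1) hcase (by omega)).symm
  · -- the gap x lies above current-1, hence ≤ max_cup; both sides wrap
    have hxd : ¬ x ≤ current - 1 := by
      intro hle
      have := ma_ge l (current - 1) x hle hx3
      omega
    have hxm : x ≤ mx := by omega
    have hge : mn ≤ max_cup_adjusted l mx := le_trans hx1 (ma_ge l mx x hxm hx3)
    have hA : ¬ min_cup_adjusted l mn ≤ max_cup_adjusted l (current - 1) := by
      have := mi_ge l mn; omega
    rw [if_neg hA]
    refine (selLoopB_wrap l mn mx _ (current - 1) (by omega) hge ?_).symm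
    have := ma_le l mx
    omega

-- ===== VERDICT (by name: the statement is the Claim_ definition above) =====
theorem select_destination_spec : Claim_equal_select_destination := by
  intro current removed_cups min_cup max_cup _ hpre
  unfold Spec_select_destination
  exact pre_main current removed_cups min_cup max_cup hpre
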